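-- pv_equiv track=rewrite | github.com/okfde/froide-evidencecollection | scripts/prepare_import.py | diff_posts
-- ===== SOURCE A (Python) =====
-- def diff_posts(kept: dict, dup: dict) -> list[str]:
--     diffs = []
--     for key in sorted(set(kept) | set(dup)):
--         if key not in kept:
--             diffs.append(f"  + {key}: {dup[key]!r}")
--         elif key not in dup:
--             diffs.append(f"  - {key}: {kept[key]!r}")
--         elif kept[key] != dup[key]:
--             diffs.append(f"  ~ {key}: {kept[key]!r} != {dup[key]!r}")
--     return diffs
-- ===== SOURCE B (Python) =====
-- def diff_posts(kept: dict, dup: dict) -> list[str]: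
--     ks, ds = set(kept), set(dup)
--     entries = [(k, f"  + {k}: {dup[k]!r}") for k in ds - ks]
--     entries += [(k, f"  - {k}: {kept[k]!r}") for k in ks - ds]
--     entries += [(k, f"  ~ {k}: {kept[k]!r} != {dup[k]!r}")
--                 for k in ks & ds if kept[k] != dup[k]]
--     entries.sort(key=lambda e: e[0])
--     return [line for _, line in entries]
-- ===== Notes on version B (the rewrite author's own statement) =====
-- stated objective: alternative
-- what changed: B classifies keys up front with set algebra (added = dup-kept, removed = kept-dup, changed = intersection with differing values), builds (key, line) entries per category and sorts them once by key, instead of A's if/elif chain driven over the pre-sorted union of keys.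
import Mathlib
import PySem

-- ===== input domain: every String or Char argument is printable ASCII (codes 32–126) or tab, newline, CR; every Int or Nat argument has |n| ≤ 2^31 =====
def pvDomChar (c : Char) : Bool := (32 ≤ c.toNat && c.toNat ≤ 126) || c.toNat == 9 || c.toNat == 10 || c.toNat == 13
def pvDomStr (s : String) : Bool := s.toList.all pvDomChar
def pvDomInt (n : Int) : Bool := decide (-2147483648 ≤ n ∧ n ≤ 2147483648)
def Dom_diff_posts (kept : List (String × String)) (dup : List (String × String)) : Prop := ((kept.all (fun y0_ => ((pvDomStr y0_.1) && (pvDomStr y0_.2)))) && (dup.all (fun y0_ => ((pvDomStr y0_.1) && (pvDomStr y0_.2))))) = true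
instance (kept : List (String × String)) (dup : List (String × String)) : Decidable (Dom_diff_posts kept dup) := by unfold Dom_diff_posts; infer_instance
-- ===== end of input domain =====

-- B classifies the keys by set algebra (added/removed/changed) and sorts the collected
-- entries once by key, instead of A's if/elif chain over the pre-sorted key union;
-- objective: alternative decomposition, same exact output.

-- ===== PORT A =====
-- shared helpers: Python repr(s) for str (exact on printable ASCII + tab/newline/CR),
-- the three f-string formats (identical literals in A and B), and dict lookup d[k]
-- (association list, first match per the type convention).
def pyRepr (s : String) : String :=
  let cs := s.toList
  let q : Char := if cs.contains '\'' && !(cs.contains '"') then '"' else '\''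
  String.ofList (q :: (cs.flatMap (fun c =>
    if c = '\\' then ['\\', '\\']
    else if c = q then ['\\', q]
    else if c = '\t' then ['\\', 't']
    else if c = '\n' then ['\\', 'n']
    else if c = '\r' then ['\\', 'r']
    else [c])) ++ [q])

def fmtAdd (k v : String) : String := "  + " ++ k ++ ": " ++ pyRepr v
def fmtRem (k v : String) : String := "  - " ++ k ++ ": " ++ pyRepr v
def fmtChg (k v w : String) : String := "  ~ " ++ k ++ ": " ++ pyRepr v ++ " != " ++ pyRepr w

def getK (d : List (String × String)) (k : String) : String :=
  (((d.find? (fun p => p.1 == k)).map (·.2)).getD "")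

-- A: for key in sorted(set(kept) | set(dup)): if/elif chain appending to diffs
def diff_posts (kept : List (String × String)) (dup : List (String × String)) : List String :=
  (PySem.List.sorted (PySem.Set.ofList (kept.map (·.1) ++ dup.map (·.1))) (fun k => k)).foldl
    (fun diffs key =>
      if !((kept.map (·.1)).contains key) then diffs ++ [fmtAdd key (getK dup key)]
      else if !((dup.map (·.1)).contains key) then diffs ++ [fmtRem key (getK kept key)]
      else if getK kept key ≠ getK dup key then
        diffs ++ [fmtChg key (getK kept key) (getK dup key)]
      else diffs) []

-- ===== PORT B =====
-- B: three key sets via set algebra, (key, line) entries, one sort by key.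
-- (Python iterates the intermediate sets in hash order; the final sort by the — distinct —
-- keys makes the result order-independent, so the Set order used here is exact.)
def diff_posts_alt (kept : List (String × String)) (dup : List (String × String)) : List String :=
  let ks := PySem.Set.ofList (kept.map (·.1))
  let ds := PySem.Set.ofList (dup.map (·.1))
  let entries :=
    (PySem.Set.diff ds ks).map (fun k => (k, fmtAdd k (getK dup k)))
    ++ (PySem.Set.diff ks ds).map (fun k => (k, fmtRem k (getK kept k)))
    ++ ((PySem.Set.inter ks ds).filter (fun k => getK kept k != getK dup k)).map
         (fun k => (k, fmtChg k (getK kept k) (getK dup k)))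
  (PySem.List.sorted entries (fun e => e.1)).map (·.2)

-- ===== PRECONDITION & SPEC =====
def Spec_diff_posts (kept : List (String × String)) (dup : List (String × String)) (out : List String) : Prop := out = diff_posts_alt kept dup
instance (kept : List (String × String)) (dup : List (String × String)) (out : List String) : Decidable (Spec_diff_posts kept dup out) := by unfold Spec_diff_posts; infer_instance

-- ===== CLAIM (what is proved, stated in full; the proofs are below) =====
def Claim_equal_diff_posts : Prop := ∀ (kept : List (String × String)) (dup : List (String × String)), Dom_diff_posts kept dup → Spec_diff_posts kept dup (diff_posts kept dup)

-- ===== LEMMAS AND PROOFS =====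

-- the per-key content of the diff, as an optional line (proof-only helper)
def fOpt (kept : List (String × String)) (dup : List (String × String)) (key : String) : Option String :=
  if !((kept.map (·.1)).contains key) then some (fmtAdd key (getK dup key))
  else if !((dup.map (·.1)).contains key) then some (fmtRem key (getK kept key))
  else if getK kept key ≠ getK dup key then
    some (fmtChg key (getK kept key) (getK dup key))
  else none

-- the same content paired with its key (proof-only helper)
def gOpt (kept : List (String × String)) (dup : List (String × String)) (key : String) : Option (String × String) :=
  (fOpt kept dup key).map (fun s => (key, s))

theorem fOpt_add {kept dup : List (String × String)} {k : String}
    (h1 : k ∉ kept.map (·.1)) : fOpt kept dup k = some (fmtAdd k (getK dup k)) := by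
  simp [fOpt, h1]

theorem fOpt_rem {kept dup : List (String × String)} {k : String}
    (h1 : k ∈ kept.map (·.1)) (h2 : k ∉ dup.map (·.1)) :
    fOpt kept dup k = some (fmtRem k (getK kept k)) := by
  simp [fOpt, h1, h2]

theorem fOpt_chg {kept dup : List (String × String)} {k : String}
    (h1 : k ∈ kept.map (·.1)) (h2 : k ∈ dup.map (·.1)) (h3 : getK kept k ≠ getK dup k) :
    fOpt kept dup k = some (fmtChg k (getK kept k) (getK dup k)) := by
  simp [fOpt, h1, h2, h3]

theorem fOpt_none {kept dup : List (String × String)} {k : String}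
    (h1 : k ∈ kept.map (·.1)) (h2 : k ∈ dup.map (·.1)) (h3 : getK kept k = getK dup k) :
    fOpt kept dup k = none := by
  simp [fOpt, h1, h2, h3]

theorem gOpt_fst {kept dup : List (String × String)} {k : String} {x : String × String}
    (h : gOpt kept dup k = some x) : x.1 = k := by
  unfold gOpt at h
  rcases h' : fOpt kept dup k with _ | s
  · rw [h'] at h; simp at h
  · rw [h'] at h
    simp only [Option.map_some, Option.some_inj] at h
    rw [← h]

-- A's foldl is a filterMap of fOpt
theorem foldA (kept dup : List (String × String)) :
    ∀ (keys : List String) (acc : List String),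
      keys.foldl (fun diffs key =>
        if !((kept.map (·.1)).contains key) then diffs ++ [fmtAdd key (getK dup key)]
        else if !((dup.map (·.1)).contains key) then diffs ++ [fmtRem key (getK kept key)]
        else if getK kept key ≠ getK dup key then
          diffs ++ [fmtChg key (getK kept key) (getK dup key)]
        else diffs) acc
      = acc ++ keys.filterMap (fOpt kept dup) := by
  intro keys
  induction keys with
  | nil => intro acc; simp
  | cons k t ih =>
    intro acc
    rw [List.foldl_cons, List.filterMap_cons]
    by_cases h1 : k ∈ kept.map (·.1)
    · by_cases h2 : k ∈ dup.map (·.1)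
      · by_cases h3 : getK kept k = getK dup k
        · rw [fOpt_none h1 h2 h3]
          rw [if_neg (by simp [h1]), if_neg (by simp [h2]), if_neg (by simp [h3])]
          exact ih acc
        · rw [fOpt_chg h1 h2 h3]
          rw [if_neg (by simp [h1]), if_neg (by simp [h2]), if_pos (by simp [h3])]
          rw [ih]; simp
      · rw [fOpt_rem h1 h2]
        rw [if_neg (by simp [h1]), if_pos (by simp [h2])]
        rw [ih]; simp
    · rw [fOpt_add h1]
      rw [if_pos (by simp [h1])]
      rw [ih]; simp

theorem mem_diff_ofList (xs ys : List String) (k : String) :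
    k ∈ PySem.Set.diff (PySem.Set.ofList xs) (PySem.Set.ofList ys) ↔ k ∈ xs ∧ k ∉ ys := by
  simp [PySem.Set.diff, PySem.Set.contains, List.mem_filter, PySem.Set.mem_ofList]

theorem mem_inter_ofList (xs ys : List String) (k : String) :
    k ∈ PySem.Set.inter (PySem.Set.ofList xs) (PySem.Set.ofList ys) ↔ k ∈ xs ∧ k ∈ ys := by
  simp [PySem.Set.inter, PySem.Set.contains, List.mem_filter, PySem.Set.mem_ofList]

-- B's entry list, as a set, is the filterMap of gOpt over the key union
theorem entries_mem (kept dup : List (String × String)) (x : String × String) :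
    (x ∈ (PySem.Set.diff (PySem.Set.ofList (dup.map (·.1))) (PySem.Set.ofList (kept.map (·.1)))).map (fun k => (k, fmtAdd k (getK dup k)))
       ++ (PySem.Set.diff (PySem.Set.ofList (kept.map (·.1))) (PySem.Set.ofList (dup.map (·.1)))).map (fun k => (k, fmtRem k (getK kept k)))
       ++ ((PySem.Set.inter (PySem.Set.ofList (kept.map (·.1))) (PySem.Set.ofList (dup.map (·.1)))).filter
             (fun k => getK kept k != getK dup k)).map (fun k => (k, fmtChg k (getK kept k) (getK dup k))))
    ↔ x ∈ (PySem.Set.ofList (kept.map (·.1) ++ dup.map (·.1))).filterMap (gOpt kept dup) := by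
  rw [List.mem_filterMap]
  constructor
  · intro hx
    rcases List.mem_append.1 hx with hx' | hx'
    · rcases List.mem_append.1 hx' with hx'' | hx''
      · obtain ⟨k, hk, rfl⟩ := List.mem_map.1 hx''
        obtain ⟨hk2, hk1⟩ := (mem_diff_ofList _ _ _).1 hk
        refine ⟨k, ?_, ?_⟩
        · rw [PySem.Set.mem_ofList, List.mem_append]; exact Or.inr hk2
        · rw [gOpt, fOpt_add hk1]; rfl
      · obtain ⟨k, hk, rfl⟩ := List.mem_map.1 hx''
        obtain ⟨hk1, hk2⟩ := (mem_diff_ofList _ _ _).1 hk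
        refine ⟨k, ?_, ?_⟩
        · rw [PySem.Set.mem_ofList, List.mem_append]; exact Or.inl hk1
        · rw [gOpt, fOpt_rem hk1 hk2]; rfl
    · obtain ⟨k, hk, rfl⟩ := List.mem_map.1 hx'
      obtain ⟨hk', hne⟩ := List.mem_filter.1 hk
      obtain ⟨hk1, hk2⟩ := (mem_inter_ofList _ _ _).1 hk'
      refine ⟨k, ?_, ?_⟩
      · rw [PySem.Set.mem_ofList, List.mem_append]; exact Or.inl hk1
      · rw [gOpt, fOpt_chg hk1 hk2 (by simpa using hne)]; rfl
  · rintro ⟨k, hk, hx⟩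
    rw [PySem.Set.mem_ofList, List.mem_append] at hk
    by_cases h1 : k ∈ kept.map (·.1)
    · by_cases h2 : k ∈ dup.map (·.1)
      · by_cases h3 : getK kept k = getK dup k
        · rw [gOpt, fOpt_none h1 h2 h3] at hx; simp at hx
        · rw [gOpt, fOpt_chg h1 h2 h3, Option.map_some, Option.some_inj] at hx
          refine List.mem_append.2 (Or.inr ?_)
          rw [← hx]
          exact List.mem_map.2 ⟨k, List.mem_filter.2
            ⟨(mem_inter_ofList _ _ _).2 ⟨h1, h2⟩, by simpa using h3⟩, rfl⟩
      · rw [gOpt, fOpt_rem h1 h2, Option.map_some, Option.some_inj] at hx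
        refine List.mem_append.2 (Or.inl (List.mem_append.2 (Or.inr ?_)))
        rw [← hx]
        exact List.mem_map.2 ⟨k, (mem_diff_ofList _ _ _).2 ⟨h1, h2⟩, rfl⟩
    · rw [gOpt, fOpt_add h1, Option.map_some, Option.some_inj] at hx
      have h2 : k ∈ dup.map (·.1) := by tauto
      refine List.mem_append.2 (Or.inl (List.mem_append.2 (Or.inl ?_)))
      rw [← hx]
      exact List.mem_map.2 ⟨k, (mem_diff_ofList _ _ _).2 ⟨h2, h1⟩, rfl⟩

theorem pairKeyInj (c : String → String) : Function.Injective (fun k => (k, c k)) := by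
  intro a b h
  exact congrArg Prod.fst h

-- B's entry list is Nodup (keys are distinct within and across the three parts)
theorem entries_nodup (kept dup : List (String × String)) :
    ((PySem.Set.diff (PySem.Set.ofList (dup.map (·.1))) (PySem.Set.ofList (kept.map (·.1)))).map (fun k => (k, fmtAdd k (getK dup k)))
       ++ (PySem.Set.diff (PySem.Set.ofList (kept.map (·.1))) (PySem.Set.ofList (dup.map (·.1)))).map (fun k => (k, fmtRem k (getK kept k)))
       ++ ((PySem.Set.inter (PySem.Set.ofList (kept.map (·.1))) (PySem.Set.ofList (dup.map (·.1)))).filter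
             (fun k => getK kept k != getK dup k)).map (fun k => (k, fmtChg k (getK kept k) (getK dup k)))).Nodup := by
  rw [List.nodup_append, List.nodup_append]
  refine ⟨⟨?_, ?_, ?_⟩, ?_, ?_⟩
  · exact List.Nodup.map (pairKeyInj _) (List.Nodup.filter _ (PySem.Set.nodup_ofList _))
  · exact List.Nodup.map (pairKeyInj _) (List.Nodup.filter _ (PySem.Set.nodup_ofList _))
  · intro x hx y hy hxy
    obtain ⟨a, ha, rfl⟩ := List.mem_map.1 hx
    obtain ⟨b, hb, rfl⟩ := List.mem_map.1 hy
    obtain rfl : a = b := congrArg Prod.fst hxy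
    exact ((mem_diff_ofList _ _ _).1 ha).2 ((mem_diff_ofList _ _ _).1 hb).1
  · exact List.Nodup.map (pairKeyInj _)
      (List.Nodup.filter _ (List.Nodup.filter _ (PySem.Set.nodup_ofList _)))
  · intro x hx y hy hxy
    obtain ⟨b, hb, rfl⟩ := List.mem_map.1 hy
    have hbint := (mem_inter_ofList _ _ _).1 (List.mem_filter.1 hb).1
    rcases List.mem_append.1 hx with hx' | hx'
    · obtain ⟨a, ha, rfl⟩ := List.mem_map.1 hx'
      obtain rfl : a = b := congrArg Prod.fst hxy
      exact ((mem_diff_ofList _ _ _).1 ha).2 hbint.1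
    · obtain ⟨a, ha, rfl⟩ := List.mem_map.1 hx'
      obtain rfl : a = b := congrArg Prod.fst hxy
      exact ((mem_diff_ofList _ _ _).1 ha).2 hbint.2

-- filterMap of gOpt over a Nodup list is Nodup
theorem filterMap_gOpt_nodup (kept dup : List (String × String)) {l : List String}
    (hl : l.Nodup) : (l.filterMap (gOpt kept dup)).Nodup := by
  refine hl.filterMap ?_
  intro a a' b h h'
  exact (gOpt_fst (Option.mem_def.mp h)).symm.trans (gOpt_fst (Option.mem_def.mp h'))

theorem diff_posts_spec' (kept dup : List (String × String)) :
    diff_posts kept dup = diff_posts_alt kept dup := by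
  have halt : diff_posts_alt kept dup =
      (PySem.List.sorted
        ((PySem.Set.diff (PySem.Set.ofList (dup.map (·.1))) (PySem.Set.ofList (kept.map (·.1)))).map (fun k => (k, fmtAdd k (getK dup k)))
         ++ (PySem.Set.diff (PySem.Set.ofList (kept.map (·.1))) (PySem.Set.ofList (dup.map (·.1)))).map (fun k => (k, fmtRem k (getK kept k)))
         ++ ((PySem.Set.inter (PySem.Set.ofList (kept.map (·.1))) (PySem.Set.ofList (dup.map (·.1)))).filter
               (fun k => getK kept k != getK dup k)).map (fun k => (k, fmtChg k (getK kept k) (getK dup k))))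
        (fun e => e.1)).map (·.2) := rfl
  rw [halt]
  unfold diff_posts
  rw [foldA, List.nil_append]
  have hperm : ((PySem.List.sorted (PySem.Set.ofList (kept.map (·.1) ++ dup.map (·.1)))
      (fun k => k)).filterMap (gOpt kept dup)).Perm
      ((PySem.Set.diff (PySem.Set.ofList (dup.map (·.1))) (PySem.Set.ofList (kept.map (·.1)))).map (fun k => (k, fmtAdd k (getK dup k)))
       ++ (PySem.Set.diff (PySem.Set.ofList (kept.map (·.1))) (PySem.Set.ofList (dup.map (·.1)))).map (fun k => (k, fmtRem k (getK kept k)))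
       ++ ((PySem.Set.inter (PySem.Set.ofList (kept.map (·.1))) (PySem.Set.ofList (dup.map (·.1)))).filter
             (fun k => getK kept k != getK dup k)).map (fun k => (k, fmtChg k (getK kept k) (getK dup k)))) := by
    refine ((PySem.List.sorted_perm _ _ _).filterMap (gOpt kept dup)).trans ?_
    rw [List.perm_ext_iff_of_nodup
      (filterMap_gOpt_nodup kept dup (PySem.Set.nodup_ofList _))
      (entries_nodup kept dup)]
    intro x
    exact (entries_mem kept dup x).symm
  have hpw : ((PySem.List.sorted (PySem.Set.ofList (kept.map (·.1) ++ dup.map (·.1)))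
      (fun k => k)).filterMap (gOpt kept dup)).Pairwise (fun a b => a.1 < b.1) := by
    rw [List.pairwise_filterMap]
    refine (PySem.List.sorted_ofList_pairwise_lt _).imp ?_
    intro a a' hlt b hb b' hb'
    rw [gOpt_fst hb, gOpt_fst hb']
    exact hlt
  rw [PySem.List.sorted_eq_of_perm_of_pairwise_lt _ _ _ hperm hpw]
  rw [List.map_filterMap]
  apply List.filterMap_congr
  intro k _
  unfold gOpt
  rcases fOpt kept dup k with _ | s <;> rfl


-- ===== VERDICT (by name: the statement is the Claim_ definition above) =====
theorem diff_posts_spec : Claim_equal_diff_posts := by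
  intro kept dup _
  unfold Spec_diff_posts
  exact diff_posts_spec' kept dup
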